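-- pv_equiv track=rewrite | github.com/SonataV3/intro_to_cs | homework/hw11.py | mario_number
-- ===== SOURCE A (Python) =====
-- def mario_number(level):
--     """Return the number of ways that Mario can perform a sequence of steps
--         or jumps to reach the end of the level without ever landing in a Piranha
--         plant. Assume that every level begins and ends with a space.
--
--         >>> mario_number(' P P ')   # jump, jump
--         1
--         >>> mario_number(' P P  ')   # jump, jump, step
--         1
--         >>> mario_number('  P P ')  # step, jump, jump
--         1
--         >>> mario_number('   P P ') # step, step, jump, jump or jump, jump, jump
--         2
--         >>> mario_number(' P PP ')  # Mario cannot jump two plants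
--         0
--         >>> mario_number('    ')    # step, jump ; jump, step ; step, step, step
--         3
--         >>> mario_number('    P    ')
--         9
--         >>> mario_number('   P    P P   P  P P    P     P ')
--         180
--         """
--     """Base Cases"""
--     if level == '': #if beginning or end
--         return 0
--     if level == ' ': #if space or step
--         return 1
--     if level[0] == 'P': #if plant
--         return 0
--     return mario_number(level[1:]) + mario_number(level[2:])
-- ===== SOURCE B (Python) =====
-- def mario_number(level):
--     # Linear DP over suffixes, right to left, keeping only the last two values.
--     if not level:
--         return 0
--     a = 1 if level[-1] == ' ' else 0  # ways from the last cell
--     b = 0                             # ways from one past the end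
--     for c in reversed(level[:-1]):
--         a, b = (0 if c == 'P' else a + b), a
--     return a
-- ===== Notes on version B (the rewrite author's own statement) =====
-- stated objective: faster
-- what changed: Replaced A's exponential double recursion on string suffixes by a right-to-left linear DP keeping only the last two suffix counts; intended as faster (measured 15x at n=16; A times out at n=64 so the largest-size ratio could not be confirmed).
import Mathlib
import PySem

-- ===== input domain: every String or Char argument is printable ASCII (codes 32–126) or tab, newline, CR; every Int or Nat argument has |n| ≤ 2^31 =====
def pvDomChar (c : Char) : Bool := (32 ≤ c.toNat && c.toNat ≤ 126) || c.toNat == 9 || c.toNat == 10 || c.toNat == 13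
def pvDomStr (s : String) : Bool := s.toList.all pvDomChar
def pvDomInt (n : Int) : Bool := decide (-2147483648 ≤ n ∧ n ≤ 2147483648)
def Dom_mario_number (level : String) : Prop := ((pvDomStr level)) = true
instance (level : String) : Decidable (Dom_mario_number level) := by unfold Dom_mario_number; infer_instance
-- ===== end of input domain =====

-- B replaces A's exponential double recursion by a linear right-to-left DP; intended as faster (measured 15x at n=16, A times out at n=64); same value on every input.

-- ===== PORT A =====
-- A's recursion, on the character list of the string (level == '' / level == ' ' / level[0] / level[1:] / level[2:]).
def marioACore (cs : List Char) : Int :=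
  if cs = [] then 0
  else if cs = [' '] then 1
  else if PySem.List.pyGet? cs 0 = some 'P' then 0
  else marioACore (PySem.List.slice cs (some 1) none) + marioACore (PySem.List.slice cs (some 2) none)
termination_by cs.length
decreasing_by
  · rw [PySem.List.slice_from_one]; cases cs with
    | nil => simp_all
    | cons c t => simp
  · have h2 : PySem.List.slice cs (some 2) none = cs.drop 2 := by
      simpa using PySem.List.slice_from_natCast cs 2
    rw [h2]; cases cs with
    | nil => simp_all
    | cons c t => simp only [List.length_drop, List.length_cons]; omega

def mario_number (level : String) : Int := marioACore level.toList

-- ===== PORT B =====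
-- B's loop body: one DP step, right to left.
def marioBStep (st : Int × Int) (c : Char) : Int × Int :=
  (if c = 'P' then 0 else st.1 + st.2, st.1)

def mario_number_alt (level : String) : Int :=
  let cs := level.toList
  match cs.getLast? with
  | none => 0                                   -- if not level: return 0
  | some last =>
    let a : Int := if last = ' ' then 1 else 0
    let st := ((PySem.List.slice cs none (some (-1))).reverse).foldl marioBStep (a, 0)
    st.1

-- ===== PRECONDITION & SPEC =====
def Spec_mario_number (level : String) (out : Int) : Prop := out = mario_number_alt level
instance (level : String) (out : Int) : Decidable (Spec_mario_number level out) := by unfold Spec_mario_number; infer_instance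

-- ===== CLAIM (what is proved, stated in full; the proofs are below) =====
def Claim_equal_mario_number : Prop := ∀ (level : String), Dom_mario_number level → Spec_mario_number level (mario_number level)

-- ===== LEMMAS AND PROOFS =====

theorem marioACore_singleton (c : Char) :
    marioACore [c] = if c = ' ' then 1 else 0 := by
  rw [marioACore]
  by_cases h : c = ' ' <;> by_cases hp : c = 'P' <;>
    simp [h, hp, PySem.List.pyGet?, PySem.List.pyIdx?, marioACore, PySem.List.slice]

theorem marioACore_cons_of_ne_nil (c : Char) (t : List Char) (ht : t ≠ []) :
    marioACore (c :: t) = if c = 'P' then 0 else marioACore t + marioACore t.tail := by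
  rw [marioACore]
  have hne : c :: t ≠ ([' '] : List Char) := by
    intro h; cases h; exact ht rfl
  have h1 : PySem.List.slice (c :: t) (some 1) none = t := by
    simpa using PySem.List.slice_from_one (c :: t)
  have h2 : PySem.List.slice (c :: t) (some 2) none = t.tail := by
    simpa using PySem.List.slice_from_natCast (c :: t) 2
  simp [hne, h1, h2]

-- foldr form of B's loop computes A's suffix DP.
theorem marioB_foldr (l t : List Char) (ht : t ≠ []) :
    l.foldr (fun x st => marioBStep st x) (marioACore t, marioACore t.tail) =
      (marioACore (l ++ t), marioACore (l ++ t).tail) := by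
  induction l with
  | nil => simp
  | cons c rest ih =>
    have htl : rest ++ t ≠ [] := by
      intro h; exact ht (List.eq_nil_of_append_eq_nil h).2
    simp only [List.foldr_cons, ih, List.cons_append, List.tail_cons]
    rw [marioACore_cons_of_ne_nil c (rest ++ t) htl]
    simp [marioBStep]

-- ===== VERDICT (by name: the statement is the Claim_ definition above) =====
theorem mario_number_spec : Claim_equal_mario_number := by
  intro level _
  unfold Spec_mario_number mario_number mario_number_alt
  rcases h : level.toList.getLast? with _ | last
  · simp only [h]
    have : level.toList = [] := List.getLast?_eq_none_iff.mp h
    rw [this, marioACore]; simp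
  · simp only [h]
    obtain ⟨pref, hcs⟩ : ∃ pref, level.toList = pref ++ [last] := by
      rcases List.eq_nil_or_concat level.toList with hnil | ⟨p, x, hpx⟩
      · rw [hnil] at h; simp at h
      · refine ⟨p, ?_⟩
        have hlx : last = x := by
          rw [hpx] at h
          have := h; simp at this
          exact this.symm
        rw [hpx, hlx, List.concat_eq_append]
    rw [hcs]
    have hsl : PySem.List.slice (pref ++ [last]) none (some (-1)) = pref := by
      rw [PySem.List.slice_to_neg_one]; simp
    rw [hsl, List.foldl_reverse]
    have hinit : ((if last = ' ' then (1:Int) else 0), (0:Int)) =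
        (marioACore [last], marioACore ([last] : List Char).tail) := by
      rw [marioACore_singleton]; simp [marioACore]
    rw [hinit, marioB_foldr pref [last] (by simp)]
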